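-- pv_equiv track=rewrite | github.com/lclszsdnr/ZS-MCR | caption_format.py | find_token_span
-- ===== SOURCE A (Python) =====
-- def find_token_span(span_chars, token_char_spans):
--     matched_segments = []
--     matched_index_ranges = []
--     for start_a, end_a in span_chars:
--         segments = []
--         indices = []
--         for i, (start_b, end_b) in enumerate(token_char_spans):
--             if not (end_b < start_a or start_b > end_a):
--                 segments.append((start_b, end_b))
--                 indices.append(i)
--         matched_segments.append(segments)
--         if indices:
--             matched_index_ranges.append((indices[0], indices[-1]))
--         # else:
--         #     matched_index_ranges.append(None)  # 若没有匹配区间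
--     return matched_segments, matched_index_ranges
-- ===== SOURCE B (Python) =====
-- def find_token_span(span_chars, token_char_spans):
--     # Sort tokens by start once; per query scan the sorted list and BREAK as soon
--     # as a token starts past the query's end (all later ones do too), then restore
--     # original index order by re-sorting the (few) hits by index.
--     toks = sorted(enumerate(token_char_spans), key=lambda t: t[1][0])
--     matched_segments = []
--     matched_index_ranges = []
--     for start_a, end_a in span_chars:
--         hits = []
--         for i, (start_b, end_b) in toks:
--             if start_b > end_a:
--                 break
--             if start_a <= end_b:
--                 hits.append((i, (start_b, end_b)))
--         hits.sort(key=lambda t: t[0])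
--         matched_segments.append([seg for _, seg in hits])
--         if hits:
--             matched_index_ranges.append((hits[0][0], hits[-1][0]))
--     return matched_segments, matched_index_ranges
-- ===== Notes on version B (the rewrite author's own statement) =====
-- stated objective: alternative
-- what changed: B sorts the tokens by start position once, then for each query scans the sorted list with an early break as soon as a token starts past the query end (instead of A's full rescan of all tokens per query), and re-sorts the hits by original index to restore A's output order.
import Mathlib
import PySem

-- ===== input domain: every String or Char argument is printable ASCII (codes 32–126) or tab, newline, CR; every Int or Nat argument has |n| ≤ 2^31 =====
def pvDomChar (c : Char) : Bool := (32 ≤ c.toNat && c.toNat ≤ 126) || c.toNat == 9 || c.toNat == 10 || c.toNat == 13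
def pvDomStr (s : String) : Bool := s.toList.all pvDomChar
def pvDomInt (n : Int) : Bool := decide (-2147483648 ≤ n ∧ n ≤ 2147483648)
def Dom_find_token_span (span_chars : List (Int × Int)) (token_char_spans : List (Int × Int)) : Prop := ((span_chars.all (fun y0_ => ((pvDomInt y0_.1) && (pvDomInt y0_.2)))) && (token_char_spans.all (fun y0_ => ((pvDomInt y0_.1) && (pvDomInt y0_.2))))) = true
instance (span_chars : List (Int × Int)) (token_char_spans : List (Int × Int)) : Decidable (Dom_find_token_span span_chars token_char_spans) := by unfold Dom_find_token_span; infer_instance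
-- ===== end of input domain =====

-- B sorts tokens by start once and scans each query against the sorted list with an early break,
-- re-sorting hits by index; same result as A's full nested scan, proved equal.

-- ===== PORT A =====
-- inner loop body of A: scan tokens for one query, collecting segments and all matching indices
def stepA (q : Int × Int) (st : List (Int × Int) × List Int) (p : Int × (Int × Int)) : List (Int × Int) × List Int :=
  if ¬(p.2.2 < q.1 ∨ p.2.1 > q.2) then (st.1 ++ [(p.2.1, p.2.2)], st.2 ++ [p.1]) else st

def innerA (token_char_spans : List (Int × Int)) (q : Int × Int) : List (Int × Int) × List Int :=
  (PySem.List.enumerate token_char_spans).foldl (stepA q) ([], [])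

def find_token_span (span_chars : List (Int × Int)) (token_char_spans : List (Int × Int)) : (List (List (Int × Int))) × (List (Int × Int)) :=
  span_chars.foldl (fun acc q =>
    let inner := innerA token_char_spans q
    (acc.1 ++ [inner.1],
     match inner.2 with
     | [] => acc.2
     | h :: t => acc.2 ++ [(h, (h :: t).getLast (by simp))]))
    ([], [])

-- ===== PORT B =====
-- inner loop of B: scan the start-sorted token list, breaking as soon as a start exceeds end_a
def scanB (a b : Int) : List (Int × (Int × Int)) → List (Int × (Int × Int))
  | [] => []
  | p :: rest =>
    if p.2.1 > b then []
    else if a ≤ p.2.2 then p :: scanB a b rest else scanB a b rest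

def find_token_span_alt (span_chars : List (Int × Int)) (token_char_spans : List (Int × Int)) : (List (List (Int × Int))) × (List (Int × Int)) :=
  let toks := PySem.List.sorted (PySem.List.enumerate token_char_spans) (fun t => t.2.1) false
  span_chars.foldl (fun acc q =>
    let hits := PySem.List.sorted (scanB q.1 q.2 toks) (fun t => t.1) false
    (acc.1 ++ [hits.map (·.2)],
     match hits with
     | [] => acc.2
     | h :: t => acc.2 ++ [(h.1, ((h :: t).getLast (by simp)).1)]))
    ([], [])

-- ===== PRECONDITION & SPEC =====
def Spec_find_token_span (span_chars : List (Int × Int)) (token_char_spans : List (Int × Int)) (out : (List (List (Int × Int))) × (List (Int × Int))) : Prop := out = find_token_span_alt span_chars token_char_spans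
instance (span_chars : List (Int × Int)) (token_char_spans : List (Int × Int)) (out : (List (List (Int × Int))) × (List (Int × Int))) : Decidable (Spec_find_token_span span_chars token_char_spans out) := by unfold Spec_find_token_span; infer_instance

-- ===== CLAIM (what is proved, stated in full; the proofs are below) =====
def Claim_equal_find_token_span : Prop := ∀ (span_chars : List (Int × Int)) (token_char_spans : List (Int × Int)), Dom_find_token_span span_chars token_char_spans → Spec_find_token_span span_chars token_char_spans (find_token_span span_chars token_char_spans)

-- ===== LEMMAS AND PROOFS =====

-- the overlap predicate, and the filter of the enumerated tokens it selects
def ovl (q : Int × Int) (p : Int × (Int × Int)) : Bool :=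
  decide (q.1 ≤ p.2.2) && decide (p.2.1 ≤ q.2)

def hitsOf (token_char_spans : List (Int × Int)) (q : Int × Int) : List (Int × (Int × Int)) :=
  (PySem.List.enumerate token_char_spans).filter (ovl q)

-- index range read off a list: (first, last) when nonempty
def rangeOf (idxs : List Int) : Option (Int × Int) :=
  match idxs.head?, idxs.getLast? with
  | some f, some l => some (f, l)
  | _, _ => none

-- A's inner fold collects exactly the overlap-filtered enumerated tokens, split into spans and indices.
theorem innerA_filter (q : Int × Int) (l : List (Int × Int)) :
    ∀ (s : Int) (segs : List (Int × Int)) (idxs : List Int),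
      (PySem.List.enumerate l s).foldl (stepA q) (segs, idxs)
      = (segs ++ ((PySem.List.enumerate l s).filter (ovl q)).map (fun p => p.2),
         idxs ++ ((PySem.List.enumerate l s).filter (ovl q)).map (fun p => p.1)) := by
  induction l with
  | nil => intro s segs idxs; simp [PySem.List.enumerate_nil]
  | cons x xs ih =>
    intro s segs idxs
    rw [PySem.List.enumerate_cons]
    simp only [List.foldl_cons, List.filter_cons]
    by_cases hc : q.1 ≤ x.2 ∧ x.1 ≤ q.2
    · have hA : ¬(x.2 < q.1 ∨ x.1 > q.2) := by omega
      have ho : ovl q (s, x) = true := by simp [ovl]; omega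
      simp only [stepA, if_pos hA, ho, ih (s+1) (segs ++ [(x.1, x.2)]) (idxs ++ [s])]
      simp
    · have hA : ¬¬(x.2 < q.1 ∨ x.1 > q.2) := by omega
      have ho : ovl q (s, x) = false := by simp [ovl]; omega
      simp only [stepA, if_neg hA, ho, ih (s+1) segs idxs]
      simp

-- the early break is sound on a start-sorted list: scanB computes the overlap filter
theorem scanB_filter (a b : Int) (l : List (Int × (Int × Int)))
    (h : l.Pairwise (fun p r => p.2.1 ≤ r.2.1)) :
    scanB a b l = l.filter (ovl (a, b)) := by
  induction l with
  | nil => rfl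
  | cons p rest ih =>
    rcases List.pairwise_cons.mp h with ⟨hp, hrest⟩
    simp only [scanB, List.filter_cons]
    by_cases hb : p.2.1 > b
    · have : rest.filter (ovl (a, b)) = [] := by
        apply List.filter_eq_nil_iff.mpr
        intro r hr
        have := hp r hr
        simp [ovl]; omega
      have ho : ovl (a, b) p = false := by simp [ovl]; omega
      simp [hb, ho, this]
    · by_cases he : a ≤ p.2.2
      · have ho : ovl (a, b) p = true := by simp [ovl]; omega
        simp [hb, he, ho, ih hrest]
      · have ho : ovl (a, b) p = false := by simp [ovl]; omega
        simp [hb, he, ho, ih hrest]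

-- re-sorting the scanned hits by index yields exactly A's filter of the enumeration
theorem hits_eq (token_char_spans : List (Int × Int)) (q : Int × Int) :
    PySem.List.sorted
      (scanB q.1 q.2 (PySem.List.sorted (PySem.List.enumerate token_char_spans) (fun t => t.2.1) false))
      (fun t => t.1) false
    = hitsOf token_char_spans q := by
  have hsorted := PySem.List.sorted_pairwise (PySem.List.enumerate token_char_spans) (fun t : Int × (Int × Int) => t.2.1)
  rw [scanB_filter _ _ _ hsorted]
  have hperm : (hitsOf token_char_spans q).Perm
      ((PySem.List.sorted (PySem.List.enumerate token_char_spans) (fun t => t.2.1) false).filter (ovl (q.1, q.2))) := by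
    have := (PySem.List.sorted_perm (PySem.List.enumerate token_char_spans) (fun t : Int × (Int × Int) => t.2.1) false).symm
    simpa [hitsOf] using this.filter (ovl (q.1, q.2))
  have hpw : (hitsOf token_char_spans q).Pairwise
      (fun a b : Int × (Int × Int) => a.1 < b.1) :=
    (PySem.List.pairwise_lt_enumerate token_char_spans 0).sublist List.filter_sublist
  exact PySem.List.sorted_eq_of_perm_of_pairwise_lt _ _ _ hperm hpw

-- A's outer fold, in closed form
theorem outerA (token_char_spans : List (Int × Int)) (sc : List (Int × Int)) :
    ∀ (acc : (List (List (Int × Int))) × (List (Int × Int))),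
      sc.foldl (fun acc q =>
        let inner := innerA token_char_spans q
        (acc.1 ++ [inner.1],
         match inner.2 with
         | [] => acc.2
         | h :: t => acc.2 ++ [(h, (h :: t).getLast (by simp))])) acc
      = (acc.1 ++ sc.map (fun q => (innerA token_char_spans q).1),
         acc.2 ++ sc.filterMap (fun q => rangeOf (innerA token_char_spans q).2)) := by
  induction sc with
  | nil => intro acc; simp
  | cons q sc ih =>
    intro acc
    simp only [List.foldl_cons, ih, List.map_cons, List.filterMap_cons]
    cases hi : (innerA token_char_spans q).2 with
    | nil => simp [rangeOf]
    | cons h t =>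
      have hr : rangeOf (h :: t) = some (h, (h :: t).getLast (by simp)) := by
        simp [rangeOf, List.getLast?_eq_some_getLast]
      simp [hr]

-- B's outer fold over the hitsOf-phrased body, in closed form
theorem outerB' (token_char_spans : List (Int × Int)) (sc : List (Int × Int)) :
    ∀ (acc : (List (List (Int × Int))) × (List (Int × Int))),
      sc.foldl (fun acc q =>
        (acc.1 ++ [(hitsOf token_char_spans q).map (·.2)],
         match hitsOf token_char_spans q with
         | [] => acc.2
         | h :: t => acc.2 ++ [(h.1, ((h :: t).getLast (by simp)).1)])) acc
      = (acc.1 ++ sc.map (fun q => (hitsOf token_char_spans q).map (·.2)),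
         acc.2 ++ sc.filterMap (fun q => rangeOf ((hitsOf token_char_spans q).map (·.1)))) := by
  induction sc with
  | nil => intro acc; simp
  | cons q sc ih =>
    intro acc
    simp only [List.foldl_cons, ih, List.map_cons, List.filterMap_cons]
    cases hi : hitsOf token_char_spans q with
    | nil => simp [rangeOf]
    | cons h t =>
      have hl : ((h :: t).map (fun x => x.1)).getLast? = some (((h :: t).getLast (by simp)).1) := by
        rw [List.getLast?_map, List.getLast?_eq_some_getLast]
        rfl
      simp only [List.map_cons] at hl
      have hr : rangeOf ((h :: t).map (fun x => x.1)) = some (h.1, ((h :: t).getLast (by simp)).1) := by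
        simp only [rangeOf, List.map_cons, List.head?_cons, hl]
      simp only [List.map_cons] at hr
      simp [hr]

-- B's actual fold body equals the hitsOf-phrased body
theorem outerB (token_char_spans : List (Int × Int)) (sc : List (Int × Int))
    (acc : (List (List (Int × Int))) × (List (Int × Int))) :
      sc.foldl (fun acc q =>
        let hits := PySem.List.sorted
          (scanB q.1 q.2 (PySem.List.sorted (PySem.List.enumerate token_char_spans) (fun t => t.2.1) false))
          (fun t => t.1) false
        (acc.1 ++ [hits.map (·.2)],
         match hits with
         | [] => acc.2
         | h :: t => acc.2 ++ [(h.1, ((h :: t).getLast (by simp)).1)])) acc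
      = (acc.1 ++ sc.map (fun q => (hitsOf token_char_spans q).map (·.2)),
         acc.2 ++ sc.filterMap (fun q => rangeOf ((hitsOf token_char_spans q).map (·.1)))) := by
  rw [← outerB' token_char_spans sc acc]
  have hf : (fun (acc : (List (List (Int × Int))) × (List (Int × Int))) (q : Int × Int) =>
        let hits := PySem.List.sorted
          (scanB q.1 q.2 (PySem.List.sorted (PySem.List.enumerate token_char_spans) (fun t => t.2.1) false))
          (fun t => t.1) false
        (acc.1 ++ [hits.map (·.2)],
         match hits with
         | [] => acc.2
         | h :: t => acc.2 ++ [(h.1, ((h :: t).getLast (by simp)).1)]))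
      = (fun acc q =>
        (acc.1 ++ [(hitsOf token_char_spans q).map (·.2)],
         match hitsOf token_char_spans q with
         | [] => acc.2
         | h :: t => acc.2 ++ [(h.1, ((h :: t).getLast (by simp)).1)])) := by
    funext a q
    simp only [hits_eq]
  rw [hf]

-- ===== VERDICT (by name: the statement is the Claim_ definition above) =====
theorem find_token_span_spec : Claim_equal_find_token_span := by
  intro sc tc _
  show _ = _
  rw [find_token_span, find_token_span_alt]
  simp only []
  rw [outerA, outerB]
  have key : ∀ q : Int × Int, innerA tc q
      = ((hitsOf tc q).map (fun p => p.2), (hitsOf tc q).map (fun p => p.1)) := by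
    intro q
    simpa [hitsOf] using innerA_filter q tc 0 [] []
  refine congrArg₂ Prod.mk ?_ ?_
  · simp only [key, List.nil_append]
  · simp only [key, List.nil_append]
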